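-- pv_equiv track=rewrite | github.com/shinkeonkim/boj-solution-archiving-site | data/source/17615_77718347.py | f
-- ===== SOURCE A (Python) =====
-- def f(s, target):
--     n = len(s)
--     cnt = 0
--     chk = False
--     for i in range(n):
--         if s[i] == target:
--             if chk:
--                 cnt += 1
--         else:
--             chk = True
--
--     return cnt
-- ===== SOURCE B (Python) =====
-- def f(s, target):
--     # length of the maximal prefix made only of target characters
--     p = 0
--     while p < len(s) and s[p] == target:
--         p += 1
--     if p == len(s):
--         return 0
--     # total matches minus the matches absorbed by the all-target prefix
--     return sum(c == target for c in s) - p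
-- ===== Notes on version B (the rewrite author's own statement) =====
-- stated objective: alternative
-- what changed: Replaces A's flag-carrying conditional pass with an arithmetic formulation: answer = (total count of target-matching characters) - (length of the maximal all-target prefix), with 0 when that prefix is the whole string.
import Mathlib
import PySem

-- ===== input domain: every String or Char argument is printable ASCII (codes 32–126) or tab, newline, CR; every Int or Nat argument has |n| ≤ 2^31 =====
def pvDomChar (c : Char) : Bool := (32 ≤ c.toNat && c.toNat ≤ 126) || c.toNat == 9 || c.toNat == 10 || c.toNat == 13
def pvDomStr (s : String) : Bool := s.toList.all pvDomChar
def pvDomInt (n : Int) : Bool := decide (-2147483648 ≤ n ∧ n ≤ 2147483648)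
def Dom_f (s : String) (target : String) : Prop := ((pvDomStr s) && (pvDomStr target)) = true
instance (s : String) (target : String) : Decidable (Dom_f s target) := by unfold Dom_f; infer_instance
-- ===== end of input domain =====

-- B replaces A's flag-carrying pass by an arithmetic formulation: total matches minus the all-target prefix length; objective: alternative decomposition.


-- ===== PORT A =====
-- A: one pass keeping (cnt, chk); s[i] is a one-character string, compared to target.
def f (s : String) (target : String) : Int :=
  (s.toList.foldl
    (fun (st : Int × Bool) c =>
      if String.ofList [c] == target then
        (if st.2 then (st.1 + 1, st.2) else st)
      else
        (st.1, true))
    (0, false)).1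

-- ===== PORT B =====
-- B: p = length of the maximal all-target prefix (the while loop); 0 if p covers s, else total matches − p.
def f_alt (s : String) (target : String) : Int :=
  let p := (s.toList.takeWhile (fun c => String.ofList [c] == target)).length
  if p == s.toList.length then 0
  else (s.toList.countP (fun c => String.ofList [c] == target) : Int) - p

-- ===== PRECONDITION & SPEC =====
def Spec_f (s : String) (target : String) (out : Int) : Prop := out = f_alt s target
instance (s : String) (target : String) (out : Int) : Decidable (Spec_f s target out) := by unfold Spec_f; infer_instance

-- ===== CLAIM (what is proved, stated in full; the proofs are below) =====
def Claim_equal_f : Prop := ∀ (s : String) (target : String), Dom_f s target → Spec_f s target (f s target)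

-- ===== LEMMAS AND PROOFS =====

-- A's loop body, named so the proofs can rewrite step by step (definitionally A's lambda).
def pvStep (target : String) (st : Int × Bool) (c : Char) : Int × Bool :=
  if String.ofList [c] == target then
    (if st.2 then (st.1 + 1, st.2) else st)
  else
    (st.1, true)

theorem pvStep_match_true (target : String) (c : Char) (cnt : Int)
    (h : (String.ofList [c] == target) = true) :
    pvStep target (cnt, true) c = (cnt + 1, true) := by
  simp [pvStep, h]

theorem pvStep_match_false (target : String) (c : Char) (cnt : Int)
    (h : (String.ofList [c] == target) = true) :
    pvStep target (cnt, false) c = (cnt, false) := by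
  simp [pvStep, h]

theorem pvStep_mismatch (target : String) (c : Char) (cnt : Int) (b : Bool)
    (h : ¬ (String.ofList [c] == target) = true) :
    pvStep target (cnt, b) c = (cnt, true) := by
  simp [pvStep, h]

-- Once the flag is set, A's fold just adds the number of matches.
theorem pv_fold_true (target : String) (l : List Char) (cnt : Int) :
    l.foldl (pvStep target) (cnt, true)
      = (cnt + (l.countP (fun c => String.ofList [c] == target) : Int), true) := by
  induction l generalizing cnt with
  | nil => simp
  | cons c t ih =>
    rw [List.foldl_cons]
    by_cases h : (String.ofList [c] == target) = true
    · rw [pvStep_match_true target c cnt h, ih, List.countP_cons]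
      simp [h]
      ring
    · rw [pvStep_mismatch target c cnt true h, ih, List.countP_cons]
      simp [h]

-- Main invariant: A's fold equals B's formula (count minus all-target prefix length).
theorem pv_main (target : String) (l : List Char) :
    (l.foldl (pvStep target) (0, false)).1 =
    (if (l.takeWhile (fun c => String.ofList [c] == target)).length == l.length then (0 : Int)
     else (l.countP (fun c => String.ofList [c] == target) : Int)
          - (l.takeWhile (fun c => String.ofList [c] == target)).length) := by
  induction l with
  | nil => simp
  | cons c t ih =>
    rw [List.foldl_cons]
    by_cases h : (String.ofList [c] == target) = true
    · rw [pvStep_match_false target c 0 h, ih]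
      simp only [List.takeWhile_cons, if_true, List.length_cons, List.countP_cons, h,
        beq_iff_eq]
      by_cases he : (t.takeWhile (fun c => String.ofList [c] == target)).length = t.length
      · simp [he]
      · simp [he]
    · rw [pvStep_mismatch target c 0 false h, pv_fold_true]
      simp only [List.takeWhile_cons, h, List.length_cons, List.countP_cons, beq_iff_eq]
      simp

-- ===== VERDICT (by name: the statement is the Claim_ definition above) =====
theorem f_spec : Claim_equal_f := by
  intro s target _
  show (s.toList.foldl (pvStep target) (0, false)).1 = f_alt s target
  unfold f_alt
  exact pv_main target s.toList
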